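-- pv_equiv track=rewrite | github.com/kvncn/SudokuHelper | sudoku_helper.py | get_conflict_squares
-- ===== SOURCE A (Python) =====
-- def get_conflict_squares(squares_dict):
--     """
--     This function works similarly to the other get_conflict function. However,
--     the outer loop now iterates through keys in a dictionary and the inner loop
--     works essentailly the same in finding arrays with duplicate numbers.
--
--     Parameters:
--         squares_dict -- dictionary where the keys are tuples of two integers
--                         representing x/y coordinates of a square in the board.
--                         The values are arrays of integers that represent a
--                         square/sub-region of the board.
--
--     Returns:
--         squares -- array of tuples of two integers each representing the
--                    position of squares that have conflicting/duplicate
--                    numbers in them.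
--
--     Pre-condition:
--         The get_squares_dict function must have been called before and its
--         return must be passed as a paramter to this function.
--
--     Post-condition:
--         The function will return an array of tuples of integers representing
--         conflicting square positions.
--     """
--     squares = []
--
--     #  The outer loop initializes an empty array and the dup variable to False.
--     #  The inner loop will then append numbers that were not seen before to the
--     #  array and if the number was seen and it is different than 0, dup will be
--     #  changed to True because there is a duplicate there. Then if duplicate
--     #  was changed to True, the column number will be appended to the squares
--     #  list.
--     for coordinates in squares_dict:
--         seen = []
--         dup = False
--         for num in squares_dict[coordinates]:
--             if num not in seen:
--                 seen.append(num)
--             elif num in seen and num != 0: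
--                 dup = True
--         if dup:
--             squares.append(coordinates)
--
--     return squares
-- ===== SOURCE B (Python) =====
-- def get_conflict_squares(squares_dict):
--     conflicts = []
--     for coord, nums in squares_dict.items():
--         nz = [n for n in nums if n != 0]
--         if len(nz) != len(set(nz)):
--             conflicts.append(coord)
--     return conflicts
-- ===== Notes on version B (the rewrite author's own statement) =====
-- stated objective: simpler
-- what changed: Replaces the incremental seen-list with membership tests and a dup flag by filtering out zeros and comparing the length of the nonzero values with the size of their set (a cardinality test), collecting conflicting coordinates directly.
import Mathlib
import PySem

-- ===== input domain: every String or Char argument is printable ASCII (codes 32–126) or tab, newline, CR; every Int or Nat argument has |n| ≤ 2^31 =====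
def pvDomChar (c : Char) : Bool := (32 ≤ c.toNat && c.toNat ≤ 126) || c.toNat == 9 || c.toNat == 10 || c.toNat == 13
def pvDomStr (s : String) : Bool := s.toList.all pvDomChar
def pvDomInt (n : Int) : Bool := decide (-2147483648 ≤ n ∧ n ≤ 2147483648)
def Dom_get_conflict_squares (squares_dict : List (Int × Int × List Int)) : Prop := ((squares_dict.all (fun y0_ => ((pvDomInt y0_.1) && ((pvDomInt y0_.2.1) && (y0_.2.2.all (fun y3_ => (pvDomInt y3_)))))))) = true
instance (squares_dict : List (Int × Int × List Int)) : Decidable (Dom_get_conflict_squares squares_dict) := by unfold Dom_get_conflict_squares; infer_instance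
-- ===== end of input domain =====

-- B replaces A's incremental seen-list scan with a dup flag by a cardinality test
-- (nonzero values vs. their set) per square; objective: simpler.

-- ===== PORT A =====
-- the input association list, read as the Python dict (key = coordinate pair, later entries overwrite)
def pvDictOf (squares_dict : List (Int × Int × List Int)) : PySem.Dict (Int × Int) (List Int) :=
  PySem.Dict.ofList (squares_dict.map (fun e => ((e.1, e.2.1), e.2.2)))

def get_conflict_squares (squares_dict : List (Int × Int × List Int)) : List (Int × Int) :=
  let d := pvDictOf squares_dict
  d.keys.foldl (fun squares coordinates =>
    let st := (d.getD coordinates []).foldl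
      (fun (st : List Int × Bool) num =>
        if num ∉ st.1 then (st.1 ++ [num], st.2)
        else if num ∈ st.1 ∧ num ≠ 0 then (st.1, true)
        else st)
      ([], false)
    if st.2 then squares ++ [coordinates] else squares) []

-- ===== PORT B =====
def get_conflict_squares_alt (squares_dict : List (Int × Int × List Int)) : List (Int × Int) :=
  let d := pvDictOf squares_dict
  d.items.foldl (fun conflicts it =>
    let nz := it.2.filter (fun n => decide (n ≠ 0))
    if nz.length ≠ (PySem.Set.ofList nz).length then conflicts ++ [it.1] else conflicts) []

-- ===== PRECONDITION & SPEC =====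
def Spec_get_conflict_squares (squares_dict : List (Int × Int × List Int)) (out : List (Int × Int)) : Prop := out = get_conflict_squares_alt squares_dict
instance (squares_dict : List (Int × Int × List Int)) (out : List (Int × Int)) : Decidable (Spec_get_conflict_squares squares_dict out) := by unfold Spec_get_conflict_squares; infer_instance

-- ===== CLAIM (what is proved, stated in full; the proofs are below) =====
def Claim_equal_get_conflict_squares : Prop := ∀ (squares_dict : List (Int × Int × List Int)), Dom_get_conflict_squares squares_dict → Spec_get_conflict_squares squares_dict (get_conflict_squares squares_dict)

-- ===== LEMMAS AND PROOFS =====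

-- set(xs) keeps a subsequence of xs (first occurrences in order)
theorem pv_ofList_sublist (xs : List Int) : (PySem.Set.ofList xs).Sublist xs := by
  induction xs with
  | nil => simp [PySem.Set.ofList_nil]
  | cons x xs ih =>
      rw [PySem.Set.ofList_cons]
      exact List.Sublist.cons₂ x (List.Sublist.trans List.filter_sublist ih)

-- B's cardinality test is the (negated) Nodup test
theorem pv_card_test (nz : List Int) :
    decide (nz.length ≠ (PySem.Set.ofList nz).length) = !decide nz.Nodup := by
  by_cases h : nz.Nodup
  · rw [PySem.Set.ofList_eq_self_of_nodup nz h]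
    simp [h]
  · have hne : nz.length ≠ (PySem.Set.ofList nz).length := by
      intro hlen
      exact h ((List.Sublist.eq_of_length (pv_ofList_sublist nz) hlen.symm) ▸
        PySem.Set.nodup_ofList nz)
    simp [h, hne]

-- A's inner loop: the dup flag records a duplicate among the nonzero values
theorem pv_inner_flag (l seen : List Int) (dup : Bool)
    (hs : (seen.filter (fun n => decide (n ≠ 0))).Nodup) :
    (l.foldl (fun (st : List Int × Bool) num =>
        if num ∉ st.1 then (st.1 ++ [num], st.2)
        else if num ∈ st.1 ∧ num ≠ 0 then (st.1, true)
        else st) (seen, dup)).2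
      = (dup || !decide ((seen.filter (fun n => decide (n ≠ 0))
            ++ l.filter (fun n => decide (n ≠ 0))).Nodup)) := by
  induction l generalizing seen dup with
  | nil =>
      rw [List.foldl_nil, List.filter_nil, List.append_nil, decide_eq_true hs]
      simp
  | cons n t ih =>
      rw [List.foldl_cons]
      by_cases hn : n ∈ seen
      · rw [if_neg (not_not_intro hn)]
        by_cases h0 : n = 0
        · subst h0
          rw [if_neg (by simp), ih seen dup hs, List.filter_cons_of_neg (by simp)]
        · rw [if_pos ⟨hn, h0⟩, ih seen true hs,
            List.filter_cons_of_pos (by simp [h0])]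
          have hmem : n ∈ seen.filter (fun n => decide (n ≠ 0)) :=
            List.mem_filter.mpr ⟨hn, by simp [h0]⟩
          have hnd : ¬ ((seen.filter (fun n => decide (n ≠ 0))
              ++ n :: t.filter (fun n => decide (n ≠ 0))).Nodup) := by
            intro hnd
            rw [List.nodup_append] at hnd
            exact hnd.2.2 n hmem n List.mem_cons_self rfl
          rw [decide_eq_false hnd]
          simp
      · rw [if_pos hn]
        have hs' : (((seen ++ [n]).filter (fun n => decide (n ≠ 0)))).Nodup := by
          by_cases h0 : n = 0
          · subst h0
            simpa [List.filter_append] using hs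
          · rw [List.filter_append, List.filter_cons_of_pos (by simp [h0]),
              List.filter_nil]
            rw [List.nodup_append]
            refine ⟨hs, List.nodup_singleton n, ?_⟩
            intro a ha b hb
            rw [List.mem_singleton] at hb
            subst hb
            intro h
            exact hn (h ▸ (List.mem_filter.mp ha).1)
        rw [ih (seen ++ [n]) dup hs']
        have hlist : (seen ++ [n]).filter (fun n => decide (n ≠ 0))
              ++ t.filter (fun n => decide (n ≠ 0))
            = seen.filter (fun n => decide (n ≠ 0))
              ++ (n :: t).filter (fun n => decide (n ≠ 0)) := by
          by_cases h0 : n = 0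
          · subst h0
            simp [List.filter_append]
          · rw [List.filter_append, List.filter_cons_of_pos (by simp [h0]),
              List.filter_cons_of_pos (by simp [h0]), List.filter_nil,
              List.append_assoc]
            rfl
        rw [hlist]

-- a conditional-append loop is a filter + map
theorem pv_foldl_append_if {α β : Type} (p : α → Prop) [DecidablePred p]
    (f : α → β) (l : List α) (init : List β) :
    l.foldl (fun acc x => if p x then acc ++ [f x] else acc) init
      = init ++ (l.filter (fun x => decide (p x))).map f := by
  induction l generalizing init with
  | nil => simp
  | cons x t ih =>
      rw [List.foldl_cons]
      by_cases hp : p x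
      · rw [if_pos hp, ih, List.filter_cons_of_pos (by simp [hp])]
        simp [List.append_assoc]
      · rw [if_neg hp, ih, List.filter_cons_of_neg (by simp [hp])]

-- ===== VERDICT (by name: the statement is the Claim_ definition above) =====
theorem get_conflict_squares_spec : Claim_equal_get_conflict_squares := by
  unfold Claim_equal_get_conflict_squares
  intro squares_dict _
  unfold Spec_get_conflict_squares get_conflict_squares get_conflict_squares_alt
  set d := pvDictOf squares_dict with hd
  have hnd : d.keys.Nodup := PySem.Dict.nodup_keys_ofList _
  simp only
  rw [pv_foldl_append_if
        (p := fun it : (Int × Int) × List Int =>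
          (it.2.filter (fun n => decide (n ≠ 0))).length
            ≠ (PySem.Set.ofList (it.2.filter (fun n => decide (n ≠ 0)))).length)
        (f := fun it : (Int × Int) × List Int => it.1)]
  rw [pv_foldl_append_if
        (p := fun coordinates => ((d.getD coordinates []).foldl
          (fun (st : List Int × Bool) num =>
            if num ∉ st.1 then (st.1 ++ [num], st.2)
            else if num ∈ st.1 ∧ num ≠ 0 then (st.1, true)
            else st) ([], false)).2 = true)
        (f := fun k : Int × Int => k)]
  rw [PySem.Dict.items_eq_map_keys d hnd []]
  rw [List.filter_map, List.map_map]
  simp only [List.nil_append]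
  have hmapid : ((fun it : (Int × Int) × List Int => it.1)
      ∘ (fun k => (k, d.getD k []))) = fun k : Int × Int => k := rfl
  rw [hmapid, List.map_id', List.map_id']
  apply List.filter_congr
  intro k _
  rw [pv_inner_flag (d.getD k []) [] false (by simp)]
  simp only [List.filter_nil, List.nil_append, Bool.false_or, Function.comp]
  rw [pv_card_test]
  simp
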